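-- pv_equiv track=rewrite | github.com/CesarJimenez2000/RetosAplicacionBackendDeveloper | main.py | getRangeByIndex
-- ===== SOURCE A (Python) =====
-- def numberToBase(n, b):
--     if n == 0:
--         return [0]
--     digits = []
--     while n:
--         digits.append(int(n % b))
--         n //= b
--     return digits[::-1]
--
-- def getRangeByIndex(sheet,row,column):
--     LETTERS = 'ABCDEFGHIJKLMNOPQRSTUVWXYZ'
--     newColumnIndexes = numberToBase(column,26)
--     newColumn = ''
--     for i in newColumnIndexes:
--         newColumn += LETTERS[i]
--     range = sheet + '!' + newColumn + str(row+1)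
--     return range
-- ===== SOURCE B (Python) =====
-- def getRangeByIndex(sheet, row, column):
--     LETTERS = 'ABCDEFGHIJKLMNOPQRSTUVWXYZ'
--     # Find the largest power of 26 not exceeding column (1 for column < 26).
--     p = 1
--     while p * 26 <= column:
--         p *= 26
--     # Read the digits most-significant first by dividing by decreasing powers:
--     # column itself is never mutated, the string is built left to right,
--     # so no digit list, no reversal and no zero special case are needed.
--     newColumn = ''
--     while p > 0:
--         newColumn += LETTERS[(column // p) % 26]
--         p //= 26
--     return sheet + '!' + newColumn + str(row + 1)
-- ===== Notes on version B (the rewrite author's own statement) =====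
-- stated objective: alternative
-- what changed: Replaces A's remainder chain (mutate n with n%26 / n//=26 collecting least-significant digits, reverse the list, second pass mapping digits to letters) by a power scan: first find the largest power of 26 not exceeding column, then emit letters most-significant-first as LETTERS[(column // p) % 26] for decreasing powers p, never mutating column and building the string left to right with no digit list, no reversal and no helper.
import Mathlib
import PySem

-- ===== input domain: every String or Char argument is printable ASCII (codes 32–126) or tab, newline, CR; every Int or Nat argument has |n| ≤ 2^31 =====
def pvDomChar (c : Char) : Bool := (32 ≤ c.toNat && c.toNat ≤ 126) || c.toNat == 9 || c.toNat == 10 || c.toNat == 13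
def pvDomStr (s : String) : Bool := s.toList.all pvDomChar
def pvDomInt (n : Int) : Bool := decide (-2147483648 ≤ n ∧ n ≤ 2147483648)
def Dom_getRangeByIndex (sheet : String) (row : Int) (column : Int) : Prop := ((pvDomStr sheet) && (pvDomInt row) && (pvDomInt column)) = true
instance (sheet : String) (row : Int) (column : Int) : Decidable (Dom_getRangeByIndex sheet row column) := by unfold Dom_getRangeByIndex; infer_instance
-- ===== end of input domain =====

-- B replaces A's remainder-chain (collect n%26 digits, reverse, map to letters) by a
-- power scan: find the largest power of 26 ≤ column, then emit letters most-significant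
-- first by dividing column by decreasing powers — no digit list, no reversal, no helper.
-- Pre_ excludes column < 0, where Python A's 'while n' loop never terminates.


-- ===== PORT A =====
-- LETTERS = 'ABCDEFGHIJKLMNOPQRSTUVWXYZ' (shared literal; both Pythons index it)
def pvLetters : List Char := "ABCDEFGHIJKLMNOPQRSTUVWXYZ".toList

-- 'while n: digits.append(int(n % b)); n //= b' — fuel makes the loop total; for n ≥ 0
-- (the inputs Pre_ admits) fuel n.toNat + 1 is never exhausted, so this is the Python loop step for step
def numberToBaseLoop (fuel : Nat) (n b : Int) (digits : List Int) : List Int :=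
  match fuel with
  | 0 => digits
  | fuel + 1 =>
    if n = 0 then digits
    else numberToBaseLoop fuel (PySem.Int.floordiv n b) b (digits ++ [PySem.Int.mod n b])

def numberToBase (n b : Int) : List Int :=
  if n = 0 then [0]
  else (numberToBaseLoop (n.toNat + 1) n b []).reverse  -- digits[::-1] is reverse

def getRangeByIndex (sheet : String) (row : Int) (column : Int) : String :=
  let newColumnIndexes := numberToBase column 26
  -- for i in newColumnIndexes: newColumn += LETTERS[i]   (none = IndexError, excluded by Pre_)
  let newColumn := newColumnIndexes.foldl
    (fun s i => match PySem.List.pyGet? pvLetters i with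
      | some c => s ++ [c]
      | none => s) ([] : List Char)
  String.mk (sheet.toList ++ '!' :: (newColumn ++ PySem.Int.toChars (row + 1)))

-- ===== PORT B =====
-- 'while p * 26 <= column: p *= 26' — fuel column.toNat + 1 is never exhausted for column ≥ 0
def powLoop (fuel : Nat) (p column : Int) : Int :=
  match fuel with
  | 0 => p
  | fuel + 1 => if p * 26 ≤ column then powLoop fuel (p * 26) column else p

-- 'while p > 0: newColumn += LETTERS[(column // p) % 26]; p //= 26' — column is never mutated
def colLoop (fuel : Nat) (p column : Int) (col : List Char) : List Char :=
  match fuel with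
  | 0 => col
  | fuel + 1 =>
    if 0 < p then
      colLoop fuel (PySem.Int.floordiv p 26) column
        (col ++ (match PySem.List.pyGet? pvLetters
                   (PySem.Int.mod (PySem.Int.floordiv column p) 26) with
                 | some c => [c]
                 | none => []))
    else col

def getRangeByIndex_alt (sheet : String) (row : Int) (column : Int) : String :=
  let p := powLoop (column.toNat + 1) 1 column
  let newColumn := colLoop (p.toNat + 1) p column []
  String.mk (sheet.toList ++ '!' :: (newColumn ++ PySem.Int.toChars (row + 1)))

-- ===== PRECONDITION & SPEC =====
-- Pre_ excludes column < 0: there Python A's 'while n' loop never terminates (n //= 26 stalls at -1), so A returns on no such input.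
def Pre_getRangeByIndex (sheet : String) (row : Int) (column : Int) : Prop := 0 ≤ column
instance (sheet : String) (row : Int) (column : Int) : Decidable (Pre_getRangeByIndex sheet row column) := by unfold Pre_getRangeByIndex; infer_instance
def pvWitness_getRangeByIndex : String × Int × Int := ("Sheet1", 4, 27)

def Spec_getRangeByIndex (sheet : String) (row : Int) (column : Int) (out : String) : Prop := out = getRangeByIndex_alt sheet row column
instance (sheet : String) (row : Int) (column : Int) (out : String) : Decidable (Spec_getRangeByIndex sheet row column out) := by unfold Spec_getRangeByIndex; infer_instance

-- ===== CLAIM (what is proved, stated in full; the proofs are below) =====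
def Claim_equal_getRangeByIndex : Prop := ∀ (sheet : String) (row : Int) (column : Int), Dom_getRangeByIndex sheet row column → Pre_getRangeByIndex sheet row column → Spec_getRangeByIndex sheet row column (getRangeByIndex sheet row column)

-- ===== LEMMAS AND PROOFS =====

-- the letter block a digit d contributes ([] on IndexError, excluded by Pre_)
def letterOf (d : Int) : List Char :=
  match PySem.List.pyGet? pvLetters d with
  | some c => [c]
  | none => []

-- proof-side description of B's output: letters of n's base-26 digits from position k down to 0
def colSpec : Nat → Int → List Char
  | 0, n => letterOf (n % 26)
  | k + 1, n => letterOf (n / 26 ^ (k + 1) % 26) ++ colSpec k n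

theorem accFun_eq_letterOf (s : List Char) (i : Int) :
    (match PySem.List.pyGet? pvLetters i with
      | some c => s ++ [c]
      | none => s) = s ++ letterOf i := by
  unfold letterOf; split <;> simp

-- A's loop threads its accumulator by appending on the right
theorem numberToBaseLoop_acc (fuel : Nat) (n b : Int) (digits : List Int) :
    numberToBaseLoop fuel n b digits = digits ++ numberToBaseLoop fuel n b [] := by
  induction fuel generalizing n digits with
  | zero => simp [numberToBaseLoop]
  | succ fuel ih =>
    by_cases h : n = 0
    · simp [numberToBaseLoop, h]
    · simp only [numberToBaseLoop, if_neg h]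
      rw [ih _ (digits ++ [PySem.Int.mod n b]), ih _ ([] ++ [PySem.Int.mod n b])]
      simp

-- B's loop threads its accumulator by appending on the right too
theorem colLoop_acc (fuel : Nat) (p column : Int) (col : List Char) :
    colLoop fuel p column col = col ++ colLoop fuel p column [] := by
  induction fuel generalizing p col with
  | zero => simp [colLoop]
  | succ fuel ih =>
    by_cases h : 0 < p
    · simp only [colLoop, if_pos h]
      rw [ih _ (col ++ _), ih _ ([] ++ _)]
      simp
    · simp [colLoop, h]

-- the digits of n/26 from position k down to 0 are the digits of n from k+1 down to 1
theorem colSpec_shift (k : Nat) (n : Int) :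
    colSpec (k + 1) n = colSpec k (n / 26) ++ letterOf (n % 26) := by
  induction k generalizing n with
  | zero => simp [colSpec]
  | succ k ih =>
    show letterOf (n / 26 ^ (k + 2) % 26) ++ colSpec (k + 1) n = _
    rw [ih n]
    show _ = letterOf (n / 26 / 26 ^ (k + 1) % 26) ++ colSpec k (n / 26) ++ _
    rw [Int.ediv_ediv_of_nonneg (by norm_num), ← pow_succ' (26 : Int)]
    simp

-- B's power loop lands on the unique power of 26 bracketing column (for column ≥ 1)
theorem powLoop_spec (fuel k : Nat) (column : Int)
    (h1 : (26 : Int) ^ k ≤ column) (hf : column.toNat < 26 ^ k + fuel) :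
    ∃ m : Nat, powLoop fuel ((26 : Int) ^ k) column = 26 ^ m ∧
      (26 : Int) ^ m ≤ column ∧ column < 26 ^ (m + 1) := by
  induction fuel generalizing k with
  | zero =>
    exfalso
    have : (26 : Int) ^ k = ((26 ^ k : Nat) : Int) := by push_cast; ring
    omega
  | succ fuel ih =>
    by_cases h : (26 : Int) ^ k * 26 ≤ column
    · have hk : (26 : Int) ^ k * 26 = 26 ^ (k + 1) := by ring
      have h1' : (26 : Int) ^ (k + 1) ≤ column := hk ▸ h
      have hf' : column.toNat < 26 ^ (k + 1) + fuel := by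
        have hk1 : 1 ≤ 26 ^ k := Nat.one_le_pow _ _ (by norm_num)
        have hks : 26 ^ (k + 1) = 26 ^ k * 26 := pow_succ 26 k
        omega
      have hrec := ih (k + 1) h1' hf'
      simp only [powLoop, hk]
      rw [if_pos h1']
      exact hrec
    · refine ⟨k, by simp [powLoop, if_neg h], h1, ?_⟩
      calc column < 26 ^ k * 26 := by omega
        _ = 26 ^ (k + 1) := by ring

-- after p reaches 0 the loop stops immediately
theorem colLoop_zero (fuel : Nat) (column : Int) (col : List Char) :
    colLoop fuel 0 column col = col := by
  cases fuel <;> simp [colLoop]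

-- B's second loop, started at p = 26^k, computes colSpec k column
theorem colLoop_eq_spec (k : Nat) (fuel : Nat) (column : Int) (hc : 0 ≤ column)
    (hf : k < fuel) : colLoop fuel ((26 : Int) ^ k) column [] = colSpec k column := by
  induction k generalizing fuel with
  | zero =>
    match fuel, hf with
    | fuel + 1, _ =>
      have h1 : PySem.Int.floordiv (1 : Int) 26 = 0 := by decide
      have h2 : PySem.Int.floordiv column 1 = column :=
        (PySem.Int.floordiv_eq_ediv_of_pos (by norm_num)).trans (Int.ediv_one column)
      have h3 : PySem.Int.mod column 26 = column % 26 :=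
        PySem.Int.mod_eq_emod_of_pos (by norm_num)
      simp only [colLoop, pow_zero, if_pos (by norm_num : (0:Int) < 1), h1, h2, h3,
        colLoop_zero, colSpec, letterOf, List.nil_append]
  | succ k ih =>
    match fuel, hf with
    | fuel + 1, hf =>
      have hp : (0 : Int) < 26 ^ (k + 1) := by positivity
      have hdp : PySem.Int.floordiv ((26 : Int) ^ (k + 1)) 26 = 26 ^ k := by
        rw [PySem.Int.floordiv_eq_ediv_of_pos (by norm_num)]
        rw [pow_succ]
        exact Int.mul_ediv_cancel _ (by norm_num)
      have hdc : PySem.Int.floordiv column ((26 : Int) ^ (k + 1)) = column / 26 ^ (k + 1) :=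
        PySem.Int.floordiv_eq_ediv_of_pos hp
      have hm : PySem.Int.mod (column / 26 ^ (k + 1)) 26 = column / 26 ^ (k + 1) % 26 :=
        PySem.Int.mod_eq_emod_of_pos (by norm_num)
      simp only [colLoop, if_pos hp, hdp, hdc, hm]
      rw [colLoop_acc, ih fuel (by omega)]
      show letterOf _ ++ _ = _
      simp [colSpec]

-- the core: A's reversed remainder chain, mapped to letters, is the power scan colSpec
theorem A_eq_spec (fuel k : Nat) (n : Int)
    (h1 : (26 : Int) ^ k ≤ n) (h2 : n < 26 ^ (k + 1)) (hf : n.toNat < fuel) :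
    ((numberToBaseLoop fuel n 26 []).reverse).foldl
      (fun s i => match PySem.List.pyGet? pvLetters i with
        | some c => s ++ [c]
        | none => s) ([] : List Char) = colSpec k n := by
  induction k generalizing n fuel with
  | zero =>
    have hn1 : (1 : Int) ≤ n := by simpa using h1
    have hn26 : n < 26 := by simpa using h2
    match fuel, hf with
    | fuel + 1, hf =>
      have hne : n ≠ 0 := by omega
      have hfd : PySem.Int.floordiv n 26 = 0 := by
        rw [PySem.Int.floordiv_eq_ediv_of_pos (by norm_num)]
        omega
      have hm : PySem.Int.mod n 26 = n % 26 := PySem.Int.mod_eq_emod_of_pos (by norm_num)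
      simp only [numberToBaseLoop, if_neg hne, hfd, hm]
      rw [numberToBaseLoop_acc]
      have : numberToBaseLoop fuel 0 26 [] = [] := by cases fuel <;> simp [numberToBaseLoop]
      rw [this]
      simp [colSpec, accFun_eq_letterOf]
  | succ k ih =>
    have hpos : (0 : Int) < n := lt_of_lt_of_le (by positivity) h1
    match fuel, hf with
    | fuel + 1, hf =>
      have hne : n ≠ 0 := by omega
      have hfd : PySem.Int.floordiv n 26 = n / 26 :=
        PySem.Int.floordiv_eq_ediv_of_pos (by norm_num)
      have hm : PySem.Int.mod n 26 = n % 26 := PySem.Int.mod_eq_emod_of_pos (by norm_num)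
      have hq1 : (26 : Int) ^ k ≤ n / 26 := by
        rw [Int.le_ediv_iff_mul_le (by norm_num)]
        calc (26 : Int) ^ k * 26 = 26 ^ (k + 1) := by ring
          _ ≤ n := h1
      have hq2 : n / 26 < 26 ^ (k + 1) := by
        rw [Int.ediv_lt_iff_lt_mul (by norm_num)]
        calc n < 26 ^ (k + 1 + 1) := h2
          _ = 26 ^ (k + 1) * 26 := by ring
      have hq0 : 0 ≤ n / 26 := Int.ediv_nonneg (le_of_lt hpos) (by norm_num)
      have hlt : (n / 26).toNat < fuel := by
        have hk1 : (1 : Int) ≤ 26 ^ k := one_le_pow₀ (by norm_num)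
        have hks : (26 : Int) ^ (k + 1) = 26 ^ k * 26 := pow_succ 26 k
        have h26 : (26 : Int) ≤ n := by nlinarith
        omega
      simp only [numberToBaseLoop, if_neg hne, hfd, hm]
      rw [numberToBaseLoop_acc]
      simp only [List.nil_append, List.reverse_append, List.reverse_cons, List.reverse_nil,
        List.nil_append, List.foldl_append]
      rw [ih fuel (n / 26) hq1 hq2 hlt]
      rw [colSpec_shift]
      simp [accFun_eq_letterOf]

-- the two column strings coincide for column ≥ 0
theorem col_eq (column : Int) (hc : 0 ≤ column) :
    (numberToBase column 26).foldl
      (fun s i => match PySem.List.pyGet? pvLetters i with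
        | some c => s ++ [c]
        | none => s) ([] : List Char) =
    colLoop ((powLoop (column.toNat + 1) 1 column).toNat + 1)
      (powLoop (column.toNat + 1) 1 column) column [] := by
  by_cases h0 : column = 0
  · subst h0; decide
  · have hpos : (0 : Int) < column := lt_of_le_of_ne hc (Ne.symm h0)
    have h1 : (26 : Int) ^ 0 ≤ column := by simpa using hpos
    obtain ⟨m, hpow, hml, hmr⟩ :=
      powLoop_spec (column.toNat + 1) 0 column h1 (by simp; omega)
    rw [pow_zero] at hpow
    rw [hpow]
    have hmfuel : m < ((26 : Int) ^ m).toNat + 1 := by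
      have : ((26 : Int) ^ m).toNat = 26 ^ m := by
        have : ((26 : Int) ^ m) = ((26 ^ m : Nat) : Int) := by push_cast; ring
        omega
      have hmlt : m < 26 ^ m := Nat.lt_pow_self (by norm_num)
      omega
    rw [colLoop_eq_spec m _ column hc hmfuel]
    unfold numberToBase
    rw [if_neg h0]
    exact A_eq_spec (column.toNat + 1) m column hml hmr (by omega)

-- ===== VERDICT (by name: the statement is the Claim_ definition above) =====
theorem getRangeByIndex_spec : Claim_equal_getRangeByIndex := by
  intro sheet row column _ hpre
  simp only [Spec_getRangeByIndex, getRangeByIndex, getRangeByIndex_alt]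
  rw [col_eq column hpre]
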